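-- pv_equiv track=rewrite | github.com/kriti-sapra/probaspil_solver | utils_logic_program.py | get_brand_new_variables
-- ===== SOURCE A (Python) =====
-- import string
--
-- def get_brand_new_variables(x):
--     """Returns x variables but doesn't affect the counter.
--
--     The variables start with "A"
--     """
--     ret = []
--     letters = string.ascii_uppercase
--     n = len(letters)
--     for i in range(0, x):
--         t = ''
--         while i >= 0:
--             t = t + letters[(i % n)]
--             i -= n
--         ret.append(t)
--     return ret
-- ===== SOURCE B (Python) =====
-- import string
--
-- def get_brand_new_variables(x):
--     """Returns x variables but doesn't affect the counter.
--
--     The variables start with "A"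
--     """
--     ret = []
--     r, c = 1, 0  # repeat count and letter index; an odometer, no division
--     while len(ret) < x:
--         ret.append(string.ascii_uppercase[c] * r)
--         c += 1
--         if c == 26:
--             c = 0
--             r += 1
--     return ret
-- ===== Notes on version B (the rewrite author's own statement) =====
-- stated objective: faster
-- what changed: Replaces A's per-index inner while loop (which rebuilds each name character by character via repeated i % 26 / i -= 26 steps and quadratic string concatenation) with a single pass maintaining an odometer state (letter index, repeat count) and emitting each name with one string repetition.
import Mathlib
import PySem

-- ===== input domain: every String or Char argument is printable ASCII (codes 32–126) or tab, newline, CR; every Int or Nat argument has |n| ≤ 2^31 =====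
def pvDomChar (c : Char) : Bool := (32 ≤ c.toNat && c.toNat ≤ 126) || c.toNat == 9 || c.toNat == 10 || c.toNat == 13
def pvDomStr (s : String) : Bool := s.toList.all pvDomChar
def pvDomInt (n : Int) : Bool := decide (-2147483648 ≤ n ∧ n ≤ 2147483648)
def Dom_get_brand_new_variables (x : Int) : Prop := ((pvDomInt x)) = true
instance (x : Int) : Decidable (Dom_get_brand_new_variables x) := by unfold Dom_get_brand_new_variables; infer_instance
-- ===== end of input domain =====

-- B replaces A's per-index inner while loop (repeated i % 26 / i -= 26) with a single
-- odometer pass over (letter index, repeat count); alternative decomposition, same result.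

-- ===== PORT A =====
-- letters = string.ascii_uppercase (as a char list, PySem.Chars style)
def pvLettersA : List Char := "ABCDEFGHIJKLMNOPQRSTUVWXYZ".toList

-- inner 'while i >= 0: t = t + letters[(i % n)]; i -= n'.
-- letters[(i % 26)] never raises in Python (0 ≤ i % 26 < 26), so .getD 'A' is never used.
def pvWhileA (i : Int) (t : List Char) : List Char :=
  if 0 ≤ i then
    pvWhileA (i - 26) (t ++ [(PySem.List.pyGet? pvLettersA (PySem.Int.mod i 26)).getD 'A'])
  else t
termination_by (i + 26).toNat
decreasing_by omega

def get_brand_new_variables (x : Int) : List String :=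
  (PySem.List.pyRange 0 x 1).foldl (fun ret i => ret ++ [String.mk (pvWhileA i [])]) []

-- ===== PORT B =====
def pvLettersB : List Char := "ABCDEFGHIJKLMNOPQRSTUVWXYZ".toList

-- 'while len(ret) < x' with odometer state (r, c); rem = number of names still to emit.
-- ascii_uppercase[c] never raises (c < 26 is an invariant), so .getD 'A' is never used.
def pvGoB (rem : Nat) (r : Nat) (c : Nat) (ret : List String) : List String :=
  match rem with
  | 0 => ret
  | Nat.succ m =>
    let ret' := ret ++ [String.mk (List.replicate r ((PySem.List.pyGet? pvLettersB (c : Int)).getD 'A'))]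
    if c + 1 = 26 then pvGoB m (r + 1) 0 ret' else pvGoB m r (c + 1) ret'

def get_brand_new_variables_alt (x : Int) : List String :=
  pvGoB x.toNat 1 0 []

-- ===== PRECONDITION & SPEC =====
def Spec_get_brand_new_variables (x : Int) (out : List String) : Prop := out = get_brand_new_variables_alt x
instance (x : Int) (out : List String) : Decidable (Spec_get_brand_new_variables x out) := by unfold Spec_get_brand_new_variables; infer_instance

-- ===== CLAIM (what is proved, stated in full; the proofs are below) =====
def Claim_equal_get_brand_new_variables : Prop := ∀ (x : Int), Dom_get_brand_new_variables x → Spec_get_brand_new_variables x (get_brand_new_variables x)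

-- ===== LEMMAS AND PROOFS =====

-- the k-th variable name (0-based)
def pvF (k : Nat) : String :=
  String.mk (List.replicate (k / 26 + 1) ((PySem.List.pyGet? pvLettersA ((k % 26 : Nat) : Int)).getD 'A'))

theorem pvWhileA_char (k : Nat) (t : List Char) :
    pvWhileA (k : Int) t =
      t ++ List.replicate (k / 26 + 1) ((PySem.List.pyGet? pvLettersA ((k % 26 : Nat) : Int)).getD 'A') := by
  induction k using Nat.strong_induction_on generalizing t with
  | _ k ih =>
    rw [pvWhileA]
    simp only [Int.ofNat_nonneg, if_pos]
    have hmod : PySem.Int.mod (k : Int) 26 = ((k % 26 : Nat) : Int) := by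
      exact_mod_cast PySem.Int.mod_natCast k 26
    rw [hmod]
    by_cases h : k < 26
    · have h0 : ¬ (0 : Int) ≤ (k : Int) - 26 := by omega
      rw [pvWhileA, if_neg h0]
      have : k / 26 = 0 := by omega
      simp [this]
    · have hk : (k : Int) - 26 = ((k - 26 : Nat) : Int) := by omega
      rw [hk, ih (k - 26) (by omega)]
      have hm : (k - 26) % 26 = k % 26 := by omega
      have hd : (k - 26) / 26 + 1 = k / 26 := by omega
      rw [hm, hd, List.append_assoc]
      simp [List.replicate_succ]

theorem pvFoldA (l : List Int) (acc : List String) :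
    l.foldl (fun ret i => ret ++ [String.mk (pvWhileA i [])]) acc
      = acc ++ l.map (fun i => String.mk (pvWhileA i [])) := by
  induction l generalizing acc with
  | nil => simp
  | cons a l ih => simp [List.foldl_cons, ih, List.append_assoc]

theorem portA_eq (x : Int) :
    get_brand_new_variables x = (List.range x.toNat).map pvF := by
  unfold get_brand_new_variables
  rw [PySem.List.pyRange_one, pvFoldA]
  simp only [List.nil_append, sub_zero, List.map_map]
  apply List.map_congr_left
  intro k _
  simp only [Function.comp_apply, zero_add, pvF]
  rw [pvWhileA_char]
  simp

theorem pvGoB_char (m : Nat) : ∀ (k : Nat) (ret : List String),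
    pvGoB m (k / 26 + 1) (k % 26) ret = ret ++ (List.range' k m).map pvF := by
  induction m with
  | zero => intro k ret; simp [pvGoB]
  | succ m ih =>
    intro k ret
    rw [pvGoB]
    have hL : pvLettersB = pvLettersA := rfl
    by_cases h : k % 26 + 1 = 26
    · rw [if_pos h]
      have ih' := ih (k + 1) (ret ++ [String.mk (List.replicate (k / 26 + 1)
        ((PySem.List.pyGet? pvLettersB ((k % 26 : Nat) : Int)).getD 'A'))])
      rw [show (k + 1) / 26 = k / 26 + 1 from by omega,
          show (k + 1) % 26 = 0 from by omega] at ih'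
      rw [ih']
      simp [List.range'_succ, pvF, hL, List.append_assoc]
    · rw [if_neg h]
      have ih' := ih (k + 1) (ret ++ [String.mk (List.replicate (k / 26 + 1)
        ((PySem.List.pyGet? pvLettersB ((k % 26 : Nat) : Int)).getD 'A'))])
      rw [show (k + 1) / 26 = k / 26 from by omega,
          show (k + 1) % 26 = k % 26 + 1 from by omega] at ih'
      rw [ih']
      simp [List.range'_succ, pvF, hL, List.append_assoc]

theorem portB_eq (x : Int) :
    get_brand_new_variables_alt x = (List.range x.toNat).map pvF := by
  unfold get_brand_new_variables_alt
  have := pvGoB_char x.toNat 0 []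
  simpa [List.range_eq_range'] using this

-- ===== VERDICT (by name: the statement is the Claim_ definition above) =====
theorem get_brand_new_variables_spec : Claim_equal_get_brand_new_variables := by
  intro x _
  unfold Spec_get_brand_new_variables
  rw [portA_eq, portB_eq]
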